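-- pv_equiv track=rewrite | github.com/inhanp/Python_program | programming/programming17.py | listFilterSum
-- ===== SOURCE A (Python) =====
-- def listFilterSum(val):
--     '''
--     Create a list that contains the cube of all numbers between 1 and 50 (i.e., [1,8,27,64,...]).
--     Then, using the val parameter passed into this function, return the sum of the items in your
--     list that are greater than or equal to val.
--     '''
--     list = []
--     for num in range(1, 51):
--         list.append(num**3)
--
--     result = 0
--
--     for item in list:
--         if item >= val:
--             result += item
--
--     return result
-- ===== SOURCE B (Python) =====
-- def listFilterSum(val):
--     # Closed form: find the smallest k in 1..51 with k**3 >= val, then return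
--     # the suffix sum of cubes k..50 via the square-of-triangular identity.
--     k = 51
--     for n in range(1, 52):
--         if n**3 >= val:
--             k = n
--             break
--     return 1625625 - ((k - 1) * k // 2) ** 2
-- ===== Notes on version B (the rewrite author's own statement) =====
-- stated objective: simpler
-- what changed: Instead of building the cube list and summing a filtered scan, B locates the smallest k whose cube reaches val and returns the closed-form suffix sum of cubes via the square-of-triangular-number identity.
import Mathlib
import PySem

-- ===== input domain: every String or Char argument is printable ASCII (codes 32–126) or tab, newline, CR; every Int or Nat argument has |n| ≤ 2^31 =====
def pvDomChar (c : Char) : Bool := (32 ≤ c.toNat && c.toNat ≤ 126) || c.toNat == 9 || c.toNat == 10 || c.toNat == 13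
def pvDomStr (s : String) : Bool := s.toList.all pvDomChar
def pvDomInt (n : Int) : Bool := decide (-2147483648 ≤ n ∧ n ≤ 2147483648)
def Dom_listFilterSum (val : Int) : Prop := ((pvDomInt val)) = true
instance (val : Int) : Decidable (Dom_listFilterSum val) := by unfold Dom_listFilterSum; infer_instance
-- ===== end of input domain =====

-- B replaces A's build-then-filter scan by a threshold search plus a closed-form suffix sum (objective: simpler).

-- ===== PORT A =====
def listFilterSum (val : Int) : Int :=
  -- list = []; for num in range(1, 51): list.append(num**3)
  let list : List Int := (PySem.List.pyRange 1 51 1).foldl (fun acc num => acc ++ [num ^ 3]) []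
  -- result = 0; for item in list: if item >= val: result += item
  let result : Int := list.foldl (fun result item => if item ≥ val then result + item else result) 0
  result

-- ===== PORT B =====
-- the 'for n in range(1, 52): if n**3 >= val: k = n; break' loop
def pvFindK (val : Int) : List Int → Int
  | [] => 51
  | n :: rest => if n ^ 3 ≥ val then n else pvFindK val rest

def listFilterSum_alt (val : Int) : Int :=
  let k : Int := pvFindK val (PySem.List.pyRange 1 52 1)
  1625625 - (PySem.Int.floordiv ((k - 1) * k) 2) ^ 2

-- ===== PRECONDITION & SPEC =====
def Spec_listFilterSum (val : Int) (out : Int) : Prop := out = listFilterSum_alt val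
instance (val : Int) (out : Int) : Decidable (Spec_listFilterSum val out) := by unfold Spec_listFilterSum; infer_instance

-- ===== CLAIM (what is proved, stated in full; the proofs are below) =====
def Claim_equal_listFilterSum : Prop := ∀ (val : Int), Dom_listFilterSum val → Spec_listFilterSum val (listFilterSum val)

-- ===== LEMMAS AND PROOFS =====

theorem pvCube_le_cube {a b : Int} (h : a ≤ b) (ha : 0 ≤ a) : a ^ 3 ≤ b ^ 3 := by
  nlinarith [sq_nonneg a, sq_nonneg b, sq_nonneg (a + b), mul_nonneg ha (ha.trans h)]

-- On a strictly increasing list, pvFindK either returns 51 with every cube below val,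
-- or returns a member whose cube is ≥ val while all earlier members' cubes are < val.
theorem pvFindK_spec (val : Int) (L : List Int) (hL : L.Pairwise (· < ·)) :
    (pvFindK val L = 51 ∧ ∀ x ∈ L, x ^ 3 < val) ∨
    (pvFindK val L ∈ L ∧ pvFindK val L ^ 3 ≥ val ∧
      ∀ x ∈ L, x < pvFindK val L → x ^ 3 < val) := by
  induction L with
  | nil => exact Or.inl ⟨rfl, by simp⟩
  | cons n rest ih =>
    rcases List.pairwise_cons.mp hL with ⟨hn, hrest⟩
    by_cases h : n ^ 3 ≥ val
    · right
      refine ⟨?_, ?_, ?_⟩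
      · simp [pvFindK, h]
      · simp [pvFindK, h]
      · intro x hx hlt
        simp only [pvFindK, if_pos h] at hlt
        rcases List.mem_cons.mp hx with rfl | hx
        · omega
        · exact absurd hlt (not_lt.mpr (le_of_lt (hn x hx)))
    · have hstep : pvFindK val (n :: rest) = pvFindK val rest := by
        simp [pvFindK, h]
      rcases ih hrest with ⟨h51, hall⟩ | ⟨hmem, hge, hlow⟩
      · left
        refine ⟨by rw [hstep]; exact h51, ?_⟩
        intro x hx
        rcases List.mem_cons.mp hx with rfl | hx
        · omega
        · exact hall x hx
      · right
        rw [hstep]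
        refine ⟨List.mem_cons_of_mem _ hmem, hge, ?_⟩
        intro x hx hlt
        rcases List.mem_cons.mp hx with rfl | hx
        · omega
        · exact hlow x hx hlt

theorem pvRange_lit : PySem.List.pyRange 1 52 1 =
    [1, 2, 3, 4, 5, 6, 7, 8, 9, 10, 11, 12, 13, 14, 15, 16, 17, 18, 19, 20, 21, 22, 23, 24,
     25, 26, 27, 28, 29, 30, 31, 32, 33, 34, 35, 36, 37, 38, 39, 40, 41, 42, 43, 44, 45, 46,
     47, 48, 49, 50, 51] := by decide

-- the threshold k classifies every n in 1..50: n³ ≥ val ↔ k ≤ n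
theorem pvFindK_classify (val : Int) :
    1 ≤ pvFindK val (PySem.List.pyRange 1 52 1) ∧ pvFindK val (PySem.List.pyRange 1 52 1) ≤ 51 ∧
    ∀ n : Int, 1 ≤ n → n ≤ 50 → ((n ^ 3 ≥ val) ↔ pvFindK val (PySem.List.pyRange 1 52 1) ≤ n) := by
  have hpw : (PySem.List.pyRange 1 52 1).Pairwise (· < ·) := by rw [pvRange_lit]; decide
  have hmem : ∀ x : Int, x ∈ PySem.List.pyRange 1 52 1 ↔ 1 ≤ x ∧ x < 52 := by
    intro x; exact PySem.List.mem_pyRange_one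
  rcases pvFindK_spec val _ hpw with ⟨h51, hall⟩ | ⟨hm, hge, hlow⟩
  · refine ⟨by omega, by omega, ?_⟩
    intro n h1 h50
    constructor
    · intro hge
      exact absurd hge (not_le.mpr (hall n ((hmem n).mpr ⟨h1, by omega⟩)))
    · intro hle; omega
  · have hb := (hmem _).mp hm
    refine ⟨hb.1, by omega, ?_⟩
    intro n h1 h50
    constructor
    · intro hge'
      by_contra hlt
      exact absurd hge' (not_le.mpr (hlow n ((hmem n).mpr ⟨h1, by omega⟩) (by omega)))
    · intro hle
      calc val ≤ pvFindK val (PySem.List.pyRange 1 52 1) ^ 3 := hge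
        _ ≤ n ^ 3 := pvCube_le_cube hle (by omega)

-- A's filtered sum with threshold k equals the closed-form suffix sum, for each k in 1..51
theorem pvSuffix_closed (k : Int) (h1 : 1 ≤ k) (h51 : k ≤ 51) :
    (PySem.List.pyRange 1 51 1).foldl (fun r n => if k ≤ n then r + n ^ 3 else r) 0 =
      1625625 - (PySem.Int.floordiv ((k - 1) * k) 2) ^ 2 := by
  interval_cases k <;> decide

-- ===== VERDICT (by name: the statement is the Claim_ definition above) =====
theorem listFilterSum_spec : Claim_equal_listFilterSum := by
  intro val _
  unfold Spec_listFilterSum listFilterSum listFilterSum_alt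
  obtain ⟨hk1, hk51, hcls⟩ := pvFindK_classify val
  set k := pvFindK val (PySem.List.pyRange 1 52 1) with hkdef
  have hbuild : (PySem.List.pyRange 1 51 1).foldl (fun acc num => acc ++ [num ^ 3]) ([] : List Int)
      = (PySem.List.pyRange 1 51 1).map (fun num => num ^ 3) := by
    decide
  simp only [hbuild, List.foldl_map]
  have hcg : (PySem.List.pyRange 1 51 1).foldl (fun r n => if n ^ 3 ≥ val then r + n ^ 3 else r) 0
      = (PySem.List.pyRange 1 51 1).foldl (fun r n => if k ≤ n then r + n ^ 3 else r) 0 := by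
    apply PySem.List.foldl_congr_mem
    intro acc x hx
    have hx' := PySem.List.mem_pyRange_one.mp hx
    rcases hcls x hx'.1 (by omega) with ⟨h1, h2⟩
    by_cases h : x ^ 3 ≥ val
    · rw [if_pos h, if_pos (h1 h)]
    · rw [if_neg h, if_neg (fun hc => h (h2 hc))]
  rw [hcg]
  exact pvSuffix_closed k hk1 hk51
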